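-- pv_equiv track=rewrite | github.com/dahuilangda/Boltz-WebUI | lead_optimization/mmp_lifecycle/engine.py | _summarize_core_tables
-- ===== SOURCE A (Python) =====
-- from typing import Dict, Iterable, List, Optional, Sequence, Tuple
--
-- def _summarize_core_tables(rows: List[tuple[str, str]]) -> str:
--     by_schema: dict[str, List[str]] = {}
--     for table_schema, table_name in rows:
--         by_schema.setdefault(table_schema, []).append(table_name)
--     return "; ".join(
--         f"{table_schema}: {', '.join(sorted(set(table_names)))}"
--         for table_schema, table_names in sorted(by_schema.items())
--     )
-- ===== SOURCE B (Python) =====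
-- from itertools import groupby
-- from typing import List
--
--
-- def _summarize_core_tables(rows: List[tuple[str, str]]) -> str:
--     ordered = sorted(rows, key=lambda r: r[0])
--     parts = []
--     for schema, group in groupby(ordered, key=lambda r: r[0]):
--         names = sorted({name for _, name in group})
--         parts.append(f"{schema}: {', '.join(names)}")
--     return "; ".join(parts)
-- ===== Notes on version B (the rewrite author's own statement) =====
-- stated objective: idiomatic
-- what changed: Replaces the setdefault-dict grouping plus sorted(items) with a single sort of the rows by schema followed by an itertools.groupby pass that emits each schema's formatted group directly.
import Mathlib
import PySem

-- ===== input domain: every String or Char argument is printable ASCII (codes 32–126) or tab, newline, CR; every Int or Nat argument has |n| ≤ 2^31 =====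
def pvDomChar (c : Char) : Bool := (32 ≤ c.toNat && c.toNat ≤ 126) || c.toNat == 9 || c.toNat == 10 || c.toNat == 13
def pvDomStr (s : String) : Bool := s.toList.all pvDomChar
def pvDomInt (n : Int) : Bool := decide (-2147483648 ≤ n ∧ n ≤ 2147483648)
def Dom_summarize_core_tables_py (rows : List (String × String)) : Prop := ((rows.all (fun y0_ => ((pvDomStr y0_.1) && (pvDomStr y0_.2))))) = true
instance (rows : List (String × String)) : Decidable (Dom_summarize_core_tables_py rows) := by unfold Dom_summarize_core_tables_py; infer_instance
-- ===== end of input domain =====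

-- B replaces A's setdefault-dict grouping + sorted(items) with a single sort of the
-- rows by schema followed by a groupby pass (more idiomatic; no speed claim).

-- ===== PORT A =====
-- by_schema.setdefault(k, []).append(v) is exactly d.modify k [] (· ++ [v]);
-- sorted(by_schema.items()) with no key compares the (str, list) tuples: PySem.List.sorted2.
def summarize_core_tables_py (rows : List (String × String)) : String :=
  let by_schema : PySem.Dict String (List String) :=
    rows.foldl (fun d p => d.modify p.1 [] (fun ns => ns ++ [p.2])) PySem.Dict.empty
  PySem.Str.join "; "
    ((PySem.List.sorted2 by_schema.items (fun p => p.1) (fun p => p.2)).map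
      (fun p => p.1 ++ ": " ++
        PySem.Str.join ", " (PySem.List.sorted (PySem.Set.ofList p.2) (fun x => x))))

-- ===== PORT B =====
-- itertools.groupby over a schema-sorted list: split off one maximal run of equal
-- schemas at a time (takeWhile/dropWhile), materialising each group's names.
def pyGroupby : List (String × String) → List (String × List String)
  | [] => []
  | (s, n) :: rest =>
      (s, n :: (rest.takeWhile (fun p => p.1 == s)).map (fun p => p.2)) ::
        pyGroupby (rest.dropWhile (fun p => p.1 == s))
termination_by l => l.length
decreasing_by
  simp only [List.length_cons]
  exact Nat.lt_succ_of_le (List.length_dropWhile_le _ _)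

def summarize_core_tables_py_alt (rows : List (String × String)) : String :=
  let ordered := PySem.List.sorted rows (fun r => r.1)
  PySem.Str.join "; "
    ((pyGroupby ordered).map (fun g =>
      g.1 ++ ": " ++
        PySem.Str.join ", " (PySem.List.sorted (PySem.Set.ofList g.2) (fun x => x))))

-- ===== PRECONDITION & SPEC =====
def Spec_summarize_core_tables_py (rows : List (String × String)) (out : String) : Prop := out = summarize_core_tables_py_alt rows
instance (rows : List (String × String)) (out : String) : Decidable (Spec_summarize_core_tables_py rows out) := by unfold Spec_summarize_core_tables_py; infer_instance

-- ===== CLAIM (what is proved, stated in full; the proofs are below) =====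
def Claim_equal_summarize_core_tables_py : Prop := ∀ (rows : List (String × String)), Dom_summarize_core_tables_py rows → Spec_summarize_core_tables_py rows (summarize_core_tables_py rows)

-- ===== LEMMAS AND PROOFS =====

-- the list of names filed under schema k
def schemaNames (rows : List (String × String)) (k : String) : List String :=
  (rows.filter (fun p => p.1 == k)).map (fun p => p.2)

-- the run keys pyGroupby walks over
def runKeys : List (String × String) → List String
  | [] => []
  | (s, _) :: rest => s :: runKeys (rest.dropWhile (fun p => p.1 == s))
termination_by l => l.length
decreasing_by
  simp only [List.length_cons]
  exact Nat.lt_succ_of_le (List.length_dropWhile_le _ _)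

theorem insertBy_congr {α : Type} (b1 b2 : α → α → Bool) (x : α) (acc : List α)
    (h : ∀ y ∈ acc, b1 x y = b2 x y) :
    PySem.List.insertBy b1 x acc = PySem.List.insertBy b2 x acc := by
  induction acc with
  | nil => rfl
  | cons y ys ih =>
    simp only [PySem.List.insertBy, h y (by simp)]
    split
    · rfl
    · simp only [List.cons.injEq, true_and]
      exact ih (fun z hz => h z (by simp [hz]))


theorem foldl_insertBy_congr {α : Type} (b1 b2 : α → α → Bool) (xs acc : List α)
    (h : ∀ a, (a ∈ xs ∨ a ∈ acc) → ∀ b, (b ∈ xs ∨ b ∈ acc) → b1 a b = b2 a b) :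
    xs.foldl (fun acc x => PySem.List.insertBy b1 x acc) acc
      = xs.foldl (fun acc x => PySem.List.insertBy b2 x acc) acc := by
  induction xs generalizing acc with
  | nil => rfl
  | cons x xs ih =>
    simp only [List.foldl_cons]
    rw [insertBy_congr b1 b2 x acc (fun y hy => h x (by simp) y (Or.inr hy))]
    have step : ∀ c : α, c ∈ xs ∨ c ∈ PySem.List.insertBy b2 x acc → c ∈ x :: xs ∨ c ∈ acc := by
      intro c hc
      rcases hc with h' | h'
      · exact Or.inl (by simp [h'])
      · rcases (PySem.List.mem_insertBy b2 x c acc).1 h' with rfl | h''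
        · exact Or.inl (by simp)
        · exact Or.inr h''
    exact ih _ (fun a ha b hb => h a (step a ha) b (step b hb))


theorem sorted2_eq_sorted_fst (xs : List (String × List String))
    (h : (xs.map Prod.fst).Nodup) :
    PySem.List.sorted2 xs (fun p => p.1) (fun p => p.2)
      = PySem.List.sorted xs (fun p => p.1) := by
  rw [PySem.List.sorted_eq_foldl_insertBy]
  show xs.foldl (fun acc x => PySem.List.insertBy _ x acc) [] = _
  apply foldl_insertBy_congr
  intro a ha b hb
  simp only [List.mem_nil_iff, or_false] at ha hb
  by_cases hab : a = b
  · subst hab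
    simp
  · have hne : a.1 ≠ b.1 := fun hfst => hab (List.inj_on_of_nodup_map h ha hb hfst)
    rcases lt_or_gt_of_ne hne with hlt | hgt
    · simp [hlt]
    · simp only [Bool.false_eq_true, if_false]
      rw [decide_eq_false (not_lt_of_gt hgt), decide_eq_true hgt]
      rfl


theorem dictA_items (rows : List (String × String)) :
    (rows.foldl (fun d p => d.modify p.1 [] (fun ns => ns ++ [p.2])) PySem.Dict.empty).items
      = (PySem.Set.ofList (rows.map (fun p => p.1))).map
          (fun k => (k, schemaNames rows k)) := by
  have hkeys : (rows.foldl (fun d p => d.modify p.1 [] (fun ns => ns ++ [p.2])) PySem.Dict.empty).keys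
      = PySem.Set.ofList (rows.map (fun p => p.1)) := by
    rw [PySem.Dict.keys_foldl_modify_key rows (fun p => p.1) [] (fun _ p => fun ns => ns ++ [p.2]) PySem.Dict.empty]
    simp [PySem.Set.update_nil_left]
  have hnd : (rows.foldl (fun d p => d.modify p.1 [] (fun ns => ns ++ [p.2])) PySem.Dict.empty).keys.Nodup := by
    rw [hkeys]; exact PySem.Set.nodup_ofList _
  rw [PySem.Dict.items_eq_map_keys _ hnd [], hkeys]
  apply List.map_congr_left
  intro k _
  rw [PySem.Dict.getD_foldl_modify_append rows PySem.Dict.empty k]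
  simp [schemaNames, PySem.Dict.getD_empty]


theorem drop_gt (s : String) (n : String) (rest : List (String × String))
    (h : ((s, n) :: rest).Pairwise (fun a b => a.1 ≤ b.1)) :
    ∀ p ∈ rest.dropWhile (fun p => p.1 == s), s < p.1 := by
  rcases List.pairwise_cons.1 h with ⟨h1, h2⟩
  cases hd : rest.dropWhile (fun p => p.1 == s) with
  | nil => simp
  | cons q tl =>
    have hq_mem : q ∈ rest := (List.dropWhile_sublist _).subset (hd ▸ List.mem_cons_self)
    have hq_ne : q.1 ≠ s := by
      have hne : rest.dropWhile (fun p => p.1 == s) ≠ [] := by rw [hd]; simp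
      have h' := List.head_dropWhile_not (p := fun p => p.1 == s) (l := rest) hne
      have hh : (rest.dropWhile (fun p => p.1 == s)).head hne = q := by
        simp [hd]
      rw [hh] at h'
      simpa using h'
    have hq_gt : s < q.1 := lt_of_le_of_ne (h1 q hq_mem) (Ne.symm hq_ne)
    have hpw : (q :: tl).Pairwise (fun a b => a.1 ≤ b.1) := by
      rw [← hd]; exact List.Pairwise.sublist (List.dropWhile_sublist _) h2
    intro p hp
    rcases List.mem_cons.1 hp with rfl | hp'
    · exact hq_gt
    · exact lt_of_lt_of_le hq_gt ((List.pairwise_cons.1 hpw).1 p hp')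


theorem runKeys_subset (l : List (String × String)) :
    ∀ k ∈ runKeys l, k ∈ l.map (fun p => p.1) := by
  induction l using runKeys.induct with
  | case1 => simp [runKeys]
  | case2 s n rest ih =>
    intro k hk
    rw [runKeys] at hk
    rcases List.mem_cons.1 hk with rfl | hk'
    · simp
    · have := ih k hk'
      simp only [List.mem_map] at this ⊢
      rcases this with ⟨p, hp, rfl⟩
      exact ⟨p, List.mem_cons_of_mem _ ((List.dropWhile_sublist _).subset hp), rfl⟩


theorem mem_runKeys (l : List (String × String)) (k : String) :
    k ∈ runKeys l ↔ k ∈ l.map (fun p => p.1) := by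
  constructor
  · exact runKeys_subset l k
  · induction l using runKeys.induct with
    | case1 => simp
    | case2 s n rest ih =>
      intro hk
      rw [runKeys]
      rcases List.mem_cons.1 hk with h0 | hk'
      · simp at h0; exact h0 ▸ List.mem_cons_self
      · simp only [List.mem_map] at hk'
        rcases hk' with ⟨p, hp, rfl⟩
        by_cases hps : p.1 = s
        · exact hps ▸ List.mem_cons_self
        · have hpd : p ∈ rest.dropWhile (fun p => p.1 == s) := by
            have hsplit := List.takeWhile_append_dropWhile (p := fun p => p.1 == s) (l := rest)
            rw [← hsplit] at hp
            rcases List.mem_append.1 hp with h' | h'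
            · exact absurd (by simpa using List.mem_takeWhile_imp h') hps
            · exact h'
          exact List.mem_cons_of_mem _ (ih (List.mem_map.2 ⟨p, hpd, rfl⟩))


theorem runKeys_pairwise_lt (l : List (String × String))
    (h : l.Pairwise (fun a b => a.1 ≤ b.1)) :
    (runKeys l).Pairwise (fun a b => a < b) := by
  induction l using runKeys.induct with
  | case1 => simp [runKeys]
  | case2 s n rest ih =>
    rw [runKeys]
    refine List.pairwise_cons.2 ⟨?_, ih (List.Pairwise.sublist (List.dropWhile_sublist _) ((List.pairwise_cons.1 h).2))⟩
    intro k hk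
    rcases List.mem_map.1 (runKeys_subset _ k hk) with ⟨p, hp, rfl⟩
    exact drop_gt s n rest h p hp


theorem pyGroupby_sorted (l : List (String × String))
    (h : l.Pairwise (fun a b => a.1 ≤ b.1)) :
    pyGroupby l = (runKeys l).map (fun k => (k, schemaNames l k)) := by
  induction l using pyGroupby.induct with
  | case1 => simp [pyGroupby, runKeys]
  | case2 s n rest ih =>
    rw [pyGroupby, runKeys]
    have hsplit := List.takeWhile_append_dropWhile (p := fun p => p.1 == s) (l := rest)
    have htake : ∀ p ∈ rest.takeWhile (fun p => p.1 == s), p.1 = s :=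
      fun p hp => by simpa using List.mem_takeWhile_imp hp
    have hdrop := drop_gt s n rest h
    simp only [List.map_cons, List.cons.injEq, Prod.mk.injEq, true_and]
    constructor
    · -- head group: filter of rest at s is exactly the takeWhile run
      have hfil : rest.filter (fun p => p.1 == s) = rest.takeWhile (fun p => p.1 == s) := by
        conv_lhs => rw [← hsplit]
        rw [List.filter_append,
            List.filter_eq_self.2 (fun p hp => by simp [htake p hp]),
            List.filter_eq_nil_iff.2 (fun p hp => by simp [Ne.symm (ne_of_lt (hdrop p hp))]),
            List.append_nil]
      rw [schemaNames, List.filter_cons]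
      simp only [beq_self_eq_true, if_pos, List.map_cons, hfil]
    · -- tail groups
      rw [ih (List.Pairwise.sublist (List.dropWhile_sublist _) ((List.pairwise_cons.1 h).2))]
      apply List.map_congr_left
      intro k hk
      rcases List.mem_map.1 (runKeys_subset _ k hk) with ⟨q, hq, rfl⟩
      have hgt := hdrop q hq
      refine congrArg _ ?_
      have hfil : rest.filter (fun p => p.1 == q.1)
          = (rest.dropWhile (fun p => p.1 == s)).filter (fun p => p.1 == q.1) := by
        conv_lhs => rw [← hsplit]
        rw [List.filter_append,
            List.filter_eq_nil_iff.2 (fun p hp => by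
              simp [htake p hp, ne_of_lt hgt]),
            List.nil_append]
      rw [schemaNames, schemaNames, List.filter_cons]
      rw [if_neg (by simp [ne_of_lt hgt])]
      rw [hfil]


theorem schemaNames_perm (rows l : List (String × String)) (hp : l.Perm rows) (k : String) :
    PySem.List.sorted (PySem.Set.ofList (schemaNames l k)) (fun x => x)
      = PySem.List.sorted (PySem.Set.ofList (schemaNames rows k)) (fun x => x) := by
  apply PySem.List.sorted_eq_sorted_of_perm
      (PySem.Set.ofList (schemaNames l k)) (PySem.Set.ofList (schemaNames rows k))
      (fun x => x) (fun _ _ h => h)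
  rw [List.perm_ext_iff_of_nodup (PySem.Set.nodup_ofList _) (PySem.Set.nodup_ofList _)]
  intro x
  rw [PySem.Set.mem_ofList, PySem.Set.mem_ofList]
  exact List.Perm.mem_iff (((hp.filter _).map _))

-- ===== VERDICT (by name: the statement is the Claim_ definition above) =====
theorem summarize_core_tables_py_spec : Claim_equal_summarize_core_tables_py := by
  intro rows _
  show summarize_core_tables_py rows = summarize_core_tables_py_alt rows
  have hordered : (PySem.List.sorted rows (fun r => r.1)).Perm rows :=
    PySem.List.sorted_perm _ _ _
  have hks_pw : (PySem.List.sorted (PySem.Set.ofList (rows.map (fun p => p.1))) (fun x => x)).Pairwise (fun a b => a < b) :=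
    PySem.List.sorted_ofList_pairwise_lt _
  -- A side: the sorted items list is ks.map (fun k => (k, schemaNames rows k))
  have hA : PySem.List.sorted2
      ((rows.foldl (fun d p => d.modify p.1 [] (fun ns => ns ++ [p.2])) PySem.Dict.empty).items)
      (fun p => p.1) (fun p => p.2)
      = (PySem.List.sorted (PySem.Set.ofList (rows.map (fun p => p.1))) (fun x => x)).map
          (fun k => (k, schemaNames rows k)) := by
    rw [dictA_items]
    have hnodup : ((PySem.Set.ofList (rows.map (fun p => p.1))).map
        (fun k => (k, schemaNames rows k)) |>.map Prod.fst).Nodup := by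
      rw [List.map_map]
      have : (Prod.fst ∘ fun k => (k, schemaNames rows k)) = fun k => k := rfl
      rw [this, List.map_id']
      exact PySem.Set.nodup_ofList _
    rw [sorted2_eq_sorted_fst _ hnodup]
    apply PySem.List.sorted_eq_of_perm_of_pairwise_lt
    · exact (PySem.List.sorted_perm _ _ _).map _
    · exact List.Pairwise.map _ (fun a b hab => hab) hks_pw
  -- B side: runKeys of the sorted rows IS the sorted key set
  have hrk : runKeys (PySem.List.sorted rows (fun r => r.1))
      = PySem.List.sorted (PySem.Set.ofList (rows.map (fun p => p.1))) (fun x => x) := by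
    symm
    apply PySem.List.sorted_eq_of_perm_of_pairwise_lt
    · have hnd : (runKeys (PySem.List.sorted rows (fun r => r.1))).Nodup :=
        List.Pairwise.imp (fun h => ne_of_lt h)
          (runKeys_pairwise_lt _ (PySem.List.sorted_pairwise _ _))
      rw [List.perm_ext_iff_of_nodup hnd (PySem.Set.nodup_ofList _)]
      intro k
      rw [mem_runKeys, PySem.Set.mem_ofList]
      exact List.Perm.mem_iff (hordered.map _)
    · exact runKeys_pairwise_lt _ (PySem.List.sorted_pairwise _ _)
  have hB : pyGroupby (PySem.List.sorted rows (fun r => r.1))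
      = (PySem.List.sorted (PySem.Set.ofList (rows.map (fun p => p.1))) (fun x => x)).map
          (fun k => (k, schemaNames (PySem.List.sorted rows (fun r => r.1)) k)) := by
    rw [pyGroupby_sorted _ (PySem.List.sorted_pairwise _ _), hrk]
  simp only [summarize_core_tables_py, summarize_core_tables_py_alt]
  rw [hA, hB, List.map_map, List.map_map]
  apply congrArg
  apply List.map_congr_left
  intro k _
  simp only [Function.comp]
  rw [schemaNames_perm rows _ hordered k]
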